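-- pv_equiv track=rewrite | github.com/mortazavilab/agoutic | launchpad/backends/slurm_backend.py | _infer_input_type_from_names
-- ===== SOURCE A (Python) =====
-- def _infer_input_type_from_names(names: list[str]) -> str | None:
--     lowered = [str(name or "").strip().lower() for name in names]
--     if any(name.endswith(".pod5") or name.endswith(".fast5") for name in lowered):
--         return "pod5"
--     if any(name.endswith(".bam") for name in lowered):
--         return "bam"
--     if any(name.endswith(".fastq") or name.endswith(".fq") for name in lowered):
--         return "fastq"
--     return None
-- ===== SOURCE B (Python) =====
-- def _infer_input_type_from_names(names):
--     found = set()
--     for name in names: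
--         n = str(name or "").strip().lower()
--         if n.endswith(".pod5") or n.endswith(".fast5"):
--             found.add("pod5")
--         elif n.endswith(".bam"):
--             found.add("bam")
--         elif n.endswith(".fastq") or n.endswith(".fq"):
--             found.add("fastq")
--     for cat in ("pod5", "bam", "fastq"):
--         if cat in found:
--             return cat
--     return None
-- ===== Notes on version B (the rewrite author's own statement) =====
-- stated objective: alternative
-- what changed: Replaces A's three repeated any-scans over the lowered list with a single classifying pass that records the categories seen in a set, followed by a fixed priority lookup over the three categories.
import Mathlib
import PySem

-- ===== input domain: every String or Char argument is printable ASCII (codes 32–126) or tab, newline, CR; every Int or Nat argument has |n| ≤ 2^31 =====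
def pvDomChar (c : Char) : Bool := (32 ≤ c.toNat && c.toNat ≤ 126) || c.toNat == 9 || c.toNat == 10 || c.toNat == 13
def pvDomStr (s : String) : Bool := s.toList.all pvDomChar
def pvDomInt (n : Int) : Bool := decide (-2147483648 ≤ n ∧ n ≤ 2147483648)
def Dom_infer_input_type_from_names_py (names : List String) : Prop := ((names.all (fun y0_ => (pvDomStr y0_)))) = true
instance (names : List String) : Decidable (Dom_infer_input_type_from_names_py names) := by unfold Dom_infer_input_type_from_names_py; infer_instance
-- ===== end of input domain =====

-- B replaces A's three repeated any-scans with one classifying pass that records the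
-- categories seen in a set, then a priority lookup; same cost, different decomposition.

-- str(name or "").strip().lower() — the normalization both Pythons apply to each name
def pvNorm (name : String) : String :=
  PySem.Str.lower (PySem.Str.strip (if name == "" then "" else name))

-- ===== PORT A =====
def infer_input_type_from_names_py (names : List String) : Option String :=
  let lowered := names.map (fun name => pvNorm name)
  if lowered.any (fun name => PySem.Str.endswith name ".pod5" || PySem.Str.endswith name ".fast5") then some "pod5"
  else if lowered.any (fun name => PySem.Str.endswith name ".bam") then some "bam"
  else if lowered.any (fun name => PySem.Str.endswith name ".fastq" || PySem.Str.endswith name ".fq") then some "fastq"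
  else none

-- ===== PORT B =====
-- the elif chain of B's loop body: the category of a single name (none = no category)
def pvClassify (name : String) : Option String :=
  let n := pvNorm name
  if PySem.Str.endswith n ".pod5" || PySem.Str.endswith n ".fast5" then some "pod5"
  else if PySem.Str.endswith n ".bam" then some "bam"
  else if PySem.Str.endswith n ".fastq" || PySem.Str.endswith n ".fq" then some "fastq"
  else none

def infer_input_type_from_names_py_alt (names : List String) : Option String :=
  let found : PySem.Set String := names.foldl (fun s name =>
    match pvClassify name with
    | some c => PySem.Set.add s c
    | none => s) PySem.Set.empty
  -- for cat in ("pod5", "bam", "fastq"): if cat in found: return cat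
  if PySem.Set.contains found "pod5" then some "pod5"
  else if PySem.Set.contains found "bam" then some "bam"
  else if PySem.Set.contains found "fastq" then some "fastq"
  else none

-- ===== PRECONDITION & SPEC =====
def Spec_infer_input_type_from_names_py (names : List String) (out : Option String) : Prop := out = infer_input_type_from_names_py_alt names
instance (names : List String) (out : Option String) : Decidable (Spec_infer_input_type_from_names_py names out) := by unfold Spec_infer_input_type_from_names_py; infer_instance

-- ===== CLAIM (what is proved, stated in full; the proofs are below) =====
def Claim_equal_infer_input_type_from_names_py : Prop := ∀ (names : List String), Dom_infer_input_type_from_names_py names → Spec_infer_input_type_from_names_py names (infer_input_type_from_names_py names)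

-- ===== LEMMAS AND PROOFS =====

-- membership in B's accumulated set = "some name classifies to c"
theorem pvContains_add (s : PySem.Set String) (x c : String) :
    PySem.Set.contains (PySem.Set.add s x) c = (PySem.Set.contains s c || c == x) := by
  simp only [PySem.Set.add]
  split_ifs with hx
  · by_cases hcx : c = x
    · subst hcx; simp_all [PySem.Set.contains]
    · simp [hcx]
  · by_cases hcx : c = x <;> simp_all [PySem.Set.contains]

theorem pvFold_contains (names : List String) (s : PySem.Set String) (c : String) :
    PySem.Set.contains (names.foldl (fun s name =>
      match pvClassify name with
      | some c => PySem.Set.add s c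
      | none => s) s) c
      = (PySem.Set.contains s c || names.any (fun n => pvClassify n == some c)) := by
  induction names generalizing s with
  | nil => simp
  | cons h t ih =>
    simp only [List.foldl_cons, List.any_cons, ih]
    cases hc : pvClassify h with
    | none => simp
    | some d =>
      rw [pvContains_add]
      by_cases hcd : c = d
      · subst hcd; simp [Bool.or_comm]
      · have h1 : (c == d) = false := beq_eq_false_iff_ne.mpr hcd
        have h2 : (d == c) = false := beq_eq_false_iff_ne.mpr fun e => hcd e.symm
        simp [h1, h2]

theorem pvClassify_pod5 (n : String) :
    (pvClassify n == some "pod5")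
      = (PySem.Str.endswith (pvNorm n) ".pod5" || PySem.Str.endswith (pvNorm n) ".fast5") := by
  simp only [pvClassify]
  split_ifs with h1 h2 h3 <;> simp_all

theorem pvClassify_bam (n : String)
    (h : (PySem.Str.endswith (pvNorm n) ".pod5" || PySem.Str.endswith (pvNorm n) ".fast5") = false) :
    (pvClassify n == some "bam") = PySem.Str.endswith (pvNorm n) ".bam" := by
  simp only [pvClassify]
  split_ifs with h1 h2 h3 <;> simp_all

theorem pvClassify_fastq (n : String)
    (h : (PySem.Str.endswith (pvNorm n) ".pod5" || PySem.Str.endswith (pvNorm n) ".fast5") = false)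
    (hb : PySem.Str.endswith (pvNorm n) ".bam" = false) :
    (pvClassify n == some "fastq")
      = (PySem.Str.endswith (pvNorm n) ".fastq" || PySem.Str.endswith (pvNorm n) ".fq") := by
  simp only [pvClassify]
  split_ifs with h1 h2 h3 <;> simp_all

-- ===== VERDICT (by name: the statement is the Claim_ definition above) =====
theorem infer_input_type_from_names_py_spec : Claim_equal_infer_input_type_from_names_py := by
  intro names _
  unfold Spec_infer_input_type_from_names_py infer_input_type_from_names_py infer_input_type_from_names_py_alt
  have hempty : ∀ c : String, PySem.Set.contains PySem.Set.empty c = false := by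
    intro c; simp [PySem.Set.empty, PySem.Set.contains]
  simp only [List.any_map, Function.comp_def, pvFold_contains, hempty, Bool.false_or]
  by_cases hp : (names.any fun name => PySem.Str.endswith (pvNorm name) ".pod5" || PySem.Str.endswith (pvNorm name) ".fast5") = true
  · have hb : (names.any fun name => pvClassify name == some "pod5") = true := by
      rw [List.any_eq_true] at hp ⊢
      obtain ⟨n, hn, h⟩ := hp
      exact ⟨n, hn, by rw [pvClassify_pod5]; exact h⟩
    rw [if_pos hp, if_pos hb]
  · have hp0 : (names.any fun name => PySem.Str.endswith (pvNorm name) ".pod5" || PySem.Str.endswith (pvNorm name) ".fast5") = false :=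
      Bool.eq_false_iff.mpr hp
    have hpm := List.any_eq_false.mp hp0
    have hcp : (names.any fun name => pvClassify name == some "pod5") = false := by
      rw [List.any_eq_false]; intro n hn
      rw [pvClassify_pod5 n]
      exact hpm n hn
    by_cases hbam : (names.any fun name => PySem.Str.endswith (pvNorm name) ".bam") = true
    · have hb : (names.any fun name => pvClassify name == some "bam") = true := by
        rw [List.any_eq_true] at hbam ⊢
        obtain ⟨n, hn, h⟩ := hbam
        refine ⟨n, hn, ?_⟩
        rw [pvClassify_bam n (Bool.eq_false_iff.mpr (hpm n hn))]
        exact h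
      have ncp : ¬ ((names.any fun name => pvClassify name == some "pod5") = true) := by simp [hcp]
      rw [if_neg hp, if_pos hbam, if_neg ncp, if_pos hb]
    · have hbam0 : (names.any fun name => PySem.Str.endswith (pvNorm name) ".bam") = false :=
        Bool.eq_false_iff.mpr hbam
      have hbm := List.any_eq_false.mp hbam0
      have hcb : (names.any fun name => pvClassify name == some "bam") = false := by
        rw [List.any_eq_false]; intro n hn
        rw [pvClassify_bam n (Bool.eq_false_iff.mpr (hpm n hn))]
        exact hbm n hn
      have hfq : (names.any fun name => pvClassify name == some "fastq")
          = (names.any fun name => PySem.Str.endswith (pvNorm name) ".fastq" || PySem.Str.endswith (pvNorm name) ".fq") := by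
        have hpt : ∀ n ∈ names, (pvClassify n == some "fastq")
            = (PySem.Str.endswith (pvNorm n) ".fastq" || PySem.Str.endswith (pvNorm n) ".fq") :=
          fun n hn => pvClassify_fastq n (Bool.eq_false_iff.mpr (hpm n hn)) (Bool.eq_false_iff.mpr (hbm n hn))
        cases hA : (names.any fun name => pvClassify name == some "fastq") with
        | true =>
          symm
          rw [List.any_eq_true] at hA ⊢
          obtain ⟨n, hn, h⟩ := hA
          exact ⟨n, hn, (hpt n hn) ▸ h⟩
        | false =>
          symm
          rw [List.any_eq_false] at hA ⊢
          intro n hn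
          rw [← hpt n hn]
          exact hA n hn
      have ncp : ¬ ((names.any fun name => pvClassify name == some "pod5") = true) := by simp [hcp]
      have ncb : ¬ ((names.any fun name => pvClassify name == some "bam") = true) := by simp [hcb]
      rw [if_neg hp, if_neg hbam, if_neg ncp, if_neg ncb, hfq]
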